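-- pv_equiv track=rewrite | github.com/jwhitham/aoc | 2023/11/main.py | compute_expansion
-- ===== SOURCE A (Python) =====
-- import typing, heapq
--
-- Expansion = typing.Dict[int, int]
--
-- def compute_expansion(occupied: typing.Set[int],
--             unexpanded_size: int, expand_constant: int) -> Expansion:
--     j = 0
--     expansion: Expansion = {}
--     for i in range(unexpanded_size):
--         expansion[i] = j
--         if i not in occupied:
--             j += expand_constant
--         else:
--             j += 1
--     return expansion
-- ===== SOURCE B (Python) =====
-- def compute_expansion(occupied, unexpanded_size, expand_constant):
--     # Segment-based: sort the occupied positions inside the range, then fill each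
--     # gap with an arithmetic progression (step expand_constant), bumping the base
--     # by 1 across each occupied position.
--     n = unexpanded_size
--     marks = sorted(x for x in occupied if 0 <= x < n)
--     expansion = {}
--     prev = 0
--     base = 0
--     for m in marks:
--         for i in range(prev, m + 1):
--             expansion[i] = base + (i - prev) * expand_constant
--         base = base + (m - prev) * expand_constant + 1
--         prev = m + 1
--     for i in range(prev, n):
--         expansion[i] = base + (i - prev) * expand_constant
--     return expansion
-- ===== Notes on version B (the rewrite author's own statement) =====
-- stated objective: alternative
-- what changed: Instead of scanning every index with a set-membership test and an accumulated running offset j, B sorts the in-range occupied positions and fills each gap between consecutive occupied positions with a closed-form arithmetic progression, bumping the segment base across each occupied position.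
import Mathlib
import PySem

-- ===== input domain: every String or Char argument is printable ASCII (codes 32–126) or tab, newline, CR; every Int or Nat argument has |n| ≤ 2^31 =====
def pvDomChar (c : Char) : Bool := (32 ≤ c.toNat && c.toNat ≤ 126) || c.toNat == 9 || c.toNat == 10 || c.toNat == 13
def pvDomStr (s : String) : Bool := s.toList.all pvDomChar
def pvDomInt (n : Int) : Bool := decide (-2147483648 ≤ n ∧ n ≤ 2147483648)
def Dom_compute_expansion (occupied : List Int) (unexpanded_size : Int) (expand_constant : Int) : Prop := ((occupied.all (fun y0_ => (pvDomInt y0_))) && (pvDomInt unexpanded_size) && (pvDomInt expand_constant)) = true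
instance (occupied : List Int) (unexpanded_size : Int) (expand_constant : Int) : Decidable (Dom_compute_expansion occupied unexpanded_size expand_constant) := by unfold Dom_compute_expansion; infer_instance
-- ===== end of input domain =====

-- B replaces A's per-index membership scan with sort-then-segment filling by
-- arithmetic progressions; objective: alternative (similar cost).

-- ===== PORT A =====
-- for i in range(n): expansion[i] = j; j += 1 if i in occupied else expand_constant
def compute_expansion (occupied : List Int) (unexpanded_size : Int) (expand_constant : Int) : List (Int × Int) :=
  ((PySem.List.pyRange 0 unexpanded_size 1).foldl
    (fun (st : Int × PySem.Dict Int Int) i =>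
      let d := st.2.insert i st.1
      if !(PySem.Set.contains occupied i) then (st.1 + expand_constant, d)
      else (st.1 + 1, d))
    (0, PySem.Dict.empty)).2.items

-- ===== PORT B =====
-- fill expansion[i] = base + (i - prev) * expand_constant for i in range(prev, stop)
def fillSeg (d : PySem.Dict Int Int) (prev stop base ec : Int) : PySem.Dict Int Int :=
  (PySem.List.pyRange prev stop 1).foldl (fun d i => d.insert i (base + (i - prev) * ec)) d

def compute_expansion_alt (occupied : List Int) (unexpanded_size : Int) (expand_constant : Int) : List (Int × Int) :=
  let n := unexpanded_size
  let marks := PySem.List.sorted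
    (occupied.filter (fun x => decide (0 ≤ x) && decide (x < n))) (fun x => x) false
  let st := marks.foldl
    (fun (st : PySem.Dict Int Int × Int × Int) m =>
      (fillSeg st.1 st.2.1 (m + 1) st.2.2 expand_constant,
       m + 1,
       st.2.2 + (m - st.2.1) * expand_constant + 1))
    (PySem.Dict.empty, 0, 0)
  (fillSeg st.1 st.2.1 n st.2.2 expand_constant).items

-- ===== PRECONDITION & SPEC =====
-- 'occupied' is a Python set; by the type convention its List encoding holds
-- DISTINCT elements, so Pre_ states exactly that (it excludes no set input).
def Pre_compute_expansion (occupied : List Int) (unexpanded_size : Int) (expand_constant : Int) : Prop :=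
  occupied.Nodup
instance (occupied : List Int) (unexpanded_size : Int) (expand_constant : Int) : Decidable (Pre_compute_expansion occupied unexpanded_size expand_constant) := by unfold Pre_compute_expansion; infer_instance
def pvWitness_compute_expansion : List Int × Int × Int := ([1, 3], 5, 10)

def Spec_compute_expansion (occupied : List Int) (unexpanded_size : Int) (expand_constant : Int) (out : List (Int × Int)) : Prop := out = compute_expansion_alt occupied unexpanded_size expand_constant
instance (occupied : List Int) (unexpanded_size : Int) (expand_constant : Int) (out : List (Int × Int)) : Decidable (Spec_compute_expansion occupied unexpanded_size expand_constant out) := by unfold Spec_compute_expansion; infer_instance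

-- ===== CLAIM (what is proved, stated in full; the proofs are below) =====
def Claim_equal_compute_expansion : Prop := ∀ (occupied : List Int) (unexpanded_size : Int) (expand_constant : Int), Dom_compute_expansion occupied unexpanded_size expand_constant → Pre_compute_expansion occupied unexpanded_size expand_constant → Spec_compute_expansion occupied unexpanded_size expand_constant (compute_expansion occupied unexpanded_size expand_constant)

-- ===== LEMMAS AND PROOFS =====

def cntBelow (occupied : List Int) (i : Int) : Int :=
  ((occupied.filter (fun x => decide (0 ≤ x) && decide (x < i))).length : Int)

def offAt (occupied : List Int) (ec i : Int) : Int :=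
  i * ec - cntBelow occupied i * (ec - 1)

lemma cnt_split (l : List Int) (a b : Int) (ha : 0 ≤ a) (h : a ≤ b) :
    cntBelow l b = cntBelow l a
      + ((l.filter (fun x => decide (a ≤ x) && decide (x < b))).length : Int) := by
  induction l with
  | nil => simp [cntBelow]
  | cons x t ih =>
    simp only [cntBelow, List.filter_cons] at ih ⊢
    split_ifs <;>
      simp only [Bool.and_eq_true, decide_eq_true_eq, not_and, not_lt, List.length_cons] at * <;>
      push_cast at ih ⊢ <;> omega

lemma cnt_zero (l : List Int) : cntBelow l 0 = 0 := by
  have h : l.filter (fun x => decide (0 ≤ x) && decide (x < 0)) = [] :=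
    List.filter_eq_nil_iff.mpr (by intro x _; simp only [Bool.and_eq_true, decide_eq_true_eq, not_and, not_lt]; omega)
  unfold cntBelow
  rw [h]; rfl

lemma cnt_const (l : List Int) (a b : Int) (ha : 0 ≤ a) (h : a ≤ b)
    (hno : ∀ x ∈ l, ¬(a ≤ x ∧ x < b)) : cntBelow l b = cntBelow l a := by
  have h2 : l.filter (fun x => decide (a ≤ x) && decide (x < b)) = [] :=
    List.filter_eq_nil_iff.mpr (by intro x hx; simpa using hno x hx)
  rw [cnt_split l a b ha h, h2]; rfl

lemma cnt_succ_mem (l : List Int) (hnd : l.Nodup) (a m : Int) (ha : 0 ≤ a) (h : a ≤ m) (hm : m ∈ l)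
    (hno : ∀ x ∈ l, ¬(a ≤ x ∧ x < m)) : cntBelow l (m + 1) = cntBelow l a + 1 := by
  rw [cnt_split l a (m + 1) ha (by omega)]
  have h1 : l.filter (fun x => decide (a ≤ x) && decide (x < m + 1))
      = l.filter (fun x => x == m) := by
    apply List.filter_congr
    intro x hx
    have hnx := hno x hx
    rw [Bool.eq_iff_iff]
    simp only [Bool.and_eq_true, decide_eq_true_eq, beq_iff_eq]
    omega
  have h2 : (l.filter (fun x => x == m)).length = l.count m := by
    rw [List.count_eq_length_filter]
  rw [h1, h2, List.count_eq_one_of_mem hnd hm]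
  push_cast; ring
lemma keys_of_items_map (d : PySem.Dict Int Int) (f : Int → Int) (s : Int)
    (hd : d.items = (PySem.List.pyRange 0 s 1).map (fun i => (i, f i))) :
    PySem.Dict.keys d = PySem.List.pyRange 0 s 1 := by
  simp only [PySem.Dict.keys, hd, List.map_map]
  rw [show ((fun p => p.1) ∘ fun i => ((i : Int), f i)) = id from rfl, List.map_id]

lemma contains_of_items_map (d : PySem.Dict Int Int) (f : Int → Int) (s t : Int)
    (hd : d.items = (PySem.List.pyRange 0 s 1).map (fun i => (i, f i)))
    (ht : ¬(0 ≤ t ∧ t < s)) : d.contains t = false := by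
  rw [PySem.Dict.contains_eq_decide_mem_keys, keys_of_items_map d f s hd]
  simp only [decide_eq_false_iff_not, PySem.List.mem_pyRange_one]
  omega

lemma fillSeg_snoc (d : PySem.Dict Int Int) (prev base ec s : Int) (h : prev ≤ s) :
    fillSeg d prev (s + 1) base ec
      = (fillSeg d prev s base ec).insert s (base + (s - prev) * ec) := by
  unfold fillSeg
  rw [PySem.List.pyRange_one_succ_right h, List.foldl_append]
  simp

lemma fillSeg_items (l : List Int) (ec : Int) (k : Nat) :
    ∀ (d : PySem.Dict Int Int) (prev base : Int), 0 ≤ prev →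
      d.items = (PySem.List.pyRange 0 prev 1).map (fun i => (i, offAt l ec i)) →
      (∀ i, prev ≤ i → i < prev + k → base + (i - prev) * ec = offAt l ec i) →
      (fillSeg d prev (prev + k) base ec).items
        = (PySem.List.pyRange 0 (prev + k) 1).map (fun i => (i, offAt l ec i)) := by
  induction k with
  | zero =>
    intro d prev base h0 hd _
    simpa [fillSeg, PySem.List.pyRange_one_eq_nil (le_refl prev)] using hd
  | succ k ih =>
    intro d prev base h0 hd hoff
    have hstop : prev + ((k : Nat) + 1 : Nat) = (prev + k) + 1 := by push_cast; ring
    rw [hstop, fillSeg_snoc d prev base ec (prev + k) (by omega)]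
    have hinner := ih d prev base h0 hd
      (fun i h1 h2 => hoff i h1 (by push_cast at h2 ⊢; omega))
    rw [PySem.Dict.items_insert_of_not_contains _ _
      (contains_of_items_map _ (fun i => offAt l ec i) (prev + k) (prev + k) hinner (by omega)), hinner]
    rw [PySem.List.pyRange_one_succ_right (by omega : (0:Int) ≤ prev + k), List.map_append]
    have h5 := hoff (prev + k) (by omega) (by push_cast; omega)
    rw [h5]
    simp
lemma A_loop (l : List Int) (hnd : l.Nodup) (ec : Int) (k : Nat) :
    ((PySem.List.pyRange 0 (k : Int) 1).foldl
      (fun (st : Int × PySem.Dict Int Int) i =>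
        let d := st.2.insert i st.1
        if !(PySem.Set.contains l i) then (st.1 + ec, d) else (st.1 + 1, d))
      (0, PySem.Dict.empty)).1 = offAt l ec k
  ∧ ((PySem.List.pyRange 0 (k : Int) 1).foldl
      (fun (st : Int × PySem.Dict Int Int) i =>
        let d := st.2.insert i st.1
        if !(PySem.Set.contains l i) then (st.1 + ec, d) else (st.1 + 1, d))
      (0, PySem.Dict.empty)).2.items
      = (PySem.List.pyRange 0 (k : Int) 1).map (fun i => (i, offAt l ec i)) := by
  induction k with
  | zero =>
    rw [PySem.List.pyRange_one_eq_nil (by omega)]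
    constructor
    · show (0 : Int) = offAt l ec 0
      unfold offAt
      rw [cnt_zero]; ring
    · simp [PySem.Dict.empty]
  | succ k ih =>
    obtain ⟨ih1, ih2⟩ := ih
    have hcast : ((k + 1 : Nat) : Int) = (k : Int) + 1 := by push_cast; ring
    rw [hcast, PySem.List.pyRange_one_succ_right (by omega), List.foldl_append,
      List.map_append]
    set F := (fun (st : Int × PySem.Dict Int Int) (i : Int) =>
        let d := st.2.insert i st.1
        if !(PySem.Set.contains l i) then (st.1 + ec, d) else (st.1 + 1, d)) with hFdef
    set S := List.foldl F (0, PySem.Dict.empty) (PySem.List.pyRange 0 (k : Int) 1) with hS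
    simp only [List.foldl_cons, List.foldl_nil]
    have hstep : F S (k : Int)
        = (if ((k : Int) ∈ l) then S.1 + 1 else S.1 + ec, S.2.insert (k : Int) S.1) := by
      by_cases hm : (k : Int) ∈ l
      · simp [hFdef, hm]
      · simp [hFdef, hm]
    rw [hstep]
    refine ⟨?_, ?_⟩
    · show (if ((k : Int) ∈ l) then S.1 + 1 else S.1 + ec) = offAt l ec ((k : Int) + 1)
      by_cases hm : (k : Int) ∈ l
      · rw [if_pos hm, ih1]
        have hcnt := cnt_succ_mem l hnd (k : Int) (k : Int) (by omega) (le_refl _) hm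
          (by intro x _; omega)
        unfold offAt; rw [hcnt]; ring
      · rw [if_neg hm, ih1]
        have hcnt : cntBelow l ((k : Int) + 1) = cntBelow l (k : Int) := by
          apply cnt_const l _ _ (by omega) (by omega)
          intro x hx hcon
          exact hm (by have hxk : x = (k : Int) := by omega
                       exact hxk ▸ hx)
        unfold offAt; rw [hcnt]; ring
    · show (S.2.insert (k : Int) S.1).items = _
      rw [PySem.Dict.items_insert_of_not_contains _ _
        (contains_of_items_map _ (fun i => offAt l ec i) (k : Int) (k : Int) ih2 (by omega)),
        ih2, ih1]
      simp
lemma off_shift (l : List Int) (ec a i : Int) (h0 : 0 ≤ a) (h : a ≤ i)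
    (hno : ∀ x ∈ l, ¬(a ≤ x ∧ x < i)) :
    offAt l ec a + (i - a) * ec = offAt l ec i := by
  unfold offAt
  rw [cnt_const l a i h0 h hno]
  ring

lemma B_loop (l : List Int) (hnd : l.Nodup) (ec n : Int) :
    ∀ (ms : List Int) (d : PySem.Dict Int Int) (prev : Int),
      0 ≤ prev → prev ≤ n →
      ms.Pairwise (· < ·) →
      (∀ x, x ∈ ms ↔ x ∈ l ∧ prev ≤ x ∧ x < n) →
      d.items = (PySem.List.pyRange 0 prev 1).map (fun i => (i, offAt l ec i)) →
      (let st := ms.foldl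
          (fun (st : PySem.Dict Int Int × Int × Int) m =>
            (fillSeg st.1 st.2.1 (m + 1) st.2.2 ec, m + 1, st.2.2 + (m - st.2.1) * ec + 1))
          (d, prev, offAt l ec prev);
        (fillSeg st.1 st.2.1 n st.2.2 ec).items)
        = (PySem.List.pyRange 0 n 1).map (fun i => (i, offAt l ec i)) := by
  intro ms
  induction ms with
  | nil =>
    intro d prev h0 hn _ hmem hd
    show (fillSeg d prev n (offAt l ec prev) ec).items = _
    have hk : n = prev + ((n - prev).toNat : Int) := by omega
    rw [hk]
    apply fillSeg_items l ec (n - prev).toNat d prev (offAt l ec prev) h0 hd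
    intro i h1 h2
    apply off_shift l ec prev i h0 h1
    intro x hx hcon
    have : x ∈ ([] : List Int) := (hmem x).mpr ⟨hx, by omega, by omega⟩
    simp at this
  | cons m rest ih =>
    intro d prev h0 hn hpw hmem hd
    obtain ⟨hm, hprev, hmn⟩ := (hmem m).mp (List.mem_cons_self ..)
    obtain ⟨hrel, hpw'⟩ := List.pairwise_cons.mp hpw
    have hno : ∀ x ∈ l, ¬(prev ≤ x ∧ x < m) := by
      intro x hx ⟨h1, h2⟩
      have hxin : x ∈ m :: rest := (hmem x).mpr ⟨hx, h1, by omega⟩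
      rcases List.mem_cons.mp hxin with h | h
      · omega
      · have := hrel x h; omega
    have hbase : offAt l ec prev + (m - prev) * ec + 1 = offAt l ec (m + 1) := by
      have hcnt := cnt_succ_mem l hnd prev m h0 hprev hm hno
      unfold offAt; rw [hcnt]; ring
    have hd' : (fillSeg d prev (m + 1) (offAt l ec prev) ec).items
        = (PySem.List.pyRange 0 (m + 1) 1).map (fun i => (i, offAt l ec i)) := by
      have hk : m + 1 = prev + ((m + 1 - prev).toNat : Int) := by omega
      rw [hk]
      apply fillSeg_items l ec (m + 1 - prev).toNat d prev (offAt l ec prev) h0 hd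
      intro i h1 h2
      apply off_shift l ec prev i h0 h1
      intro x hx hcon
      exact hno x hx ⟨hcon.1, by omega⟩
    have hrec := ih (fillSeg d prev (m + 1) (offAt l ec prev) ec) (m + 1) (by omega) (by omega) hpw'
      (by intro x
          constructor
          · intro hx
            obtain ⟨h1, h2, h3⟩ := (hmem x).mp (List.mem_cons_of_mem m hx)
            exact ⟨h1, by have := hrel x hx; omega, h3⟩
          · intro ⟨h1, h2, h3⟩
            rcases List.mem_cons.mp ((hmem x).mpr ⟨h1, by omega, h3⟩) with h | h
            · omega
            · exact h)
      hd'
    rw [← hbase] at hrec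
    rw [List.foldl_cons]
    exact hrec
lemma marks_pairwise (l : List Int) (n : Int) (hnd : l.Nodup) :
    (PySem.List.sorted (l.filter (fun x => decide (0 ≤ x) && decide (x < n)))
      (fun x => x) false).Pairwise (· < ·) := by
  have h1 := PySem.List.sorted_pairwise (l.filter (fun x => decide (0 ≤ x) && decide (x < n)))
    (fun x => x)
  have h2 : (PySem.List.sorted (l.filter (fun x => decide (0 ≤ x) && decide (x < n)))
      (fun x => x) false).Nodup :=
    ((PySem.List.sorted_perm (l.filter (fun x => decide (0 ≤ x) && decide (x < n)))
      (fun x => x) false).symm).nodup (hnd.filter _)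
  exact (h1.and h2).imp (fun h => lt_of_le_of_ne h.1 h.2)

lemma marks_mem (l : List Int) (n x : Int) :
    x ∈ PySem.List.sorted (l.filter (fun x => decide (0 ≤ x) && decide (x < n)))
      (fun x => x) false ↔ x ∈ l ∧ 0 ≤ x ∧ x < n := by
  rw [PySem.List.mem_sorted, List.mem_filter]
  simp

lemma main_eq (occ : List Int) (n ec : Int) (hnd : occ.Nodup) :
    compute_expansion occ n ec = compute_expansion_alt occ n ec := by
  have hoff0 : offAt occ ec 0 = 0 := by unfold offAt; rw [cnt_zero]; ring
  have hd0 : (PySem.Dict.empty : PySem.Dict Int Int).items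
      = (PySem.List.pyRange 0 0 1).map (fun i => (i, offAt occ ec i)) := by
    rw [PySem.List.pyRange_one_eq_nil (le_refl 0)]
    rfl
  rcases (by omega : n ≤ 0 ∨ 0 < n) with hn | hn
  · have hf : occ.filter (fun x => decide (0 ≤ x) && decide (x < n)) = [] := by
      apply List.filter_eq_nil_iff.mpr
      intro x _
      simp only [Bool.and_eq_true, decide_eq_true_eq, not_and, not_lt]
      omega
    have hA0 : compute_expansion occ n ec = [] := by
      unfold compute_expansion
      rw [PySem.List.pyRange_one_eq_nil hn]
      rfl
    have hB0 : compute_expansion_alt occ n ec = [] := by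
      show (fillSeg ((PySem.List.sorted
          ((occ.filter (fun x => decide (0 ≤ x) && decide (x < n)))) (fun x => x) false).foldl
          (fun (st : PySem.Dict Int Int × Int × Int) m =>
            (fillSeg st.1 st.2.1 (m + 1) st.2.2 ec, m + 1, st.2.2 + (m - st.2.1) * ec + 1))
          (PySem.Dict.empty, 0, 0)).1 _ n _ ec).items = []
      rw [hf]
      show (fillSeg PySem.Dict.empty 0 n 0 ec).items = []
      unfold fillSeg
      rw [PySem.List.pyRange_one_eq_nil hn]
      rfl
    rw [hA0, hB0]
  · have hk : ((n.toNat : Nat) : Int) = n := Int.toNat_of_nonneg (by omega)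
    have hA := (A_loop occ hnd ec n.toNat).2
    rw [hk] at hA
    have hB := B_loop occ hnd ec n
      (PySem.List.sorted (occ.filter (fun x => decide (0 ≤ x) && decide (x < n)))
        (fun x => x) false)
      PySem.Dict.empty 0 (le_refl 0) (by omega) (marks_pairwise occ n hnd)
      (by intro x; rw [marks_mem occ n x]) hd0
    rw [hoff0] at hB
    unfold compute_expansion compute_expansion_alt
    rw [hA]
    exact hB.symm

-- ===== VERDICT (by name: the statement is the Claim_ definition above) =====
theorem compute_expansion_spec : Claim_equal_compute_expansion := by
  intro occupied unexpanded_size expand_constant _hdom hpre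
  unfold Spec_compute_expansion
  exact main_eq occupied unexpanded_size expand_constant hpre
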